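-- pv_equiv track=rewrite | github.com/dnoitsis/project_for_ptyxiakh | functions.py | directLinkWith
-- ===== SOURCE A (Python) =====
-- def directLinkWith(start, g):
--     directLinks = [[]]
--     startLinks = []
--     for pair in g:
--         if pair[0] == start:
--             startLinks.append(pair[1])
--
--     for link in startLinks:
--         for pair in g:
--             if (pair[0] != start) and (pair[1] == link):
--                 directLinks[0].append(pair[0])
--
--     directLinks.append(startLinks)
--     return directLinks
-- ===== SOURCE B (Python) =====
-- def directLinkWith(start, g):
--     # Index non-start edges by target once, then concatenate per start-link: O(|g| + output).
--     startLinks = [b for a, b in g if a == start]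
--     by_target = {}
--     for a, b in g:
--         if a != start:
--             by_target.setdefault(b, []).append(a)
--     first = []
--     for link in startLinks:
--         first += by_target.get(link, [])
--     return [first, startLinks]
-- ===== Notes on version B (the rewrite author's own statement) =====
-- stated objective: faster
-- what changed: Replaces the rescans of g for every start-link by a single pass that groups non-start edges by target in a dict, then concatenates the per-target buckets.
import Mathlib
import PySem

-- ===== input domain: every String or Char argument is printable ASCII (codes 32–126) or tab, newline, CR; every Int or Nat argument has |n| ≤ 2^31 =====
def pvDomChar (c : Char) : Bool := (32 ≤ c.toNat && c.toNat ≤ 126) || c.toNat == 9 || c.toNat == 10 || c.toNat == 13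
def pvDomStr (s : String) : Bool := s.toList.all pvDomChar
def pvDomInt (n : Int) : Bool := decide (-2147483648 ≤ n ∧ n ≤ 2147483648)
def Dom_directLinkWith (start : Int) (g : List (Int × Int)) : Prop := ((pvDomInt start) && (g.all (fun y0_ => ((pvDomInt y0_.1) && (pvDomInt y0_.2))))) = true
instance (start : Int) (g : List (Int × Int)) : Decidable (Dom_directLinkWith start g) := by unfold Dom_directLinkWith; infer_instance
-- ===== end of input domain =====

-- B indexes non-start edges by target in one dict-building pass, then concatenates per-link buckets (asymptotically faster than A's rescan of g per start-link).


-- ===== PORT A =====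
def directLinkWith (start : Int) (g : List (Int × Int)) : List (List Int) :=
  let startLinks := g.foldl (fun acc p => if p.1 == start then acc ++ [p.2] else acc) []
  let d0 := startLinks.foldl (fun acc link =>
      g.foldl (fun acc p => if p.1 != start && p.2 == link then acc ++ [p.1] else acc) acc) []
  [d0, startLinks]

-- ===== PORT B =====
-- B: one pass groups non-start edges by target into a dict, then per-link bucket concatenation.
def directLinkWith_alt (start : Int) (g : List (Int × Int)) : List (List Int) :=
  let startLinks := (g.filter (fun p => p.1 == start)).map (·.2)
  let byTarget := g.foldl
      (fun d p => if p.1 != start then d.modify p.2 [] (· ++ [p.1]) else d)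
      (PySem.Dict.empty : PySem.Dict Int (List Int))
  let first := startLinks.foldl (fun acc link => acc ++ byTarget.getD link []) []
  [first, startLinks]

-- ===== PRECONDITION & SPEC =====
def Spec_directLinkWith (start : Int) (g : List (Int × Int)) (out : List (List Int)) : Prop := out = directLinkWith_alt start g
instance (start : Int) (g : List (Int × Int)) (out : List (List Int)) : Decidable (Spec_directLinkWith start g out) := by unfold Spec_directLinkWith; infer_instance

-- ===== CLAIM (what is proved, stated in full; the proofs are below) =====
def Claim_equal_directLinkWith : Prop := ∀ (start : Int) (g : List (Int × Int)), Dom_directLinkWith start g → Spec_directLinkWith start g (directLinkWith start g)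

-- ===== LEMMAS AND PROOFS =====

-- ===== VERDICT (by name: the statement is the Claim_ definition above) =====
-- the dict loop over g equals the grouping loop over the swapped filtered pairs
lemma dlw_fold_eq (start : Int) (g : List (Int × Int)) (d : PySem.Dict Int (List Int)) :
    g.foldl (fun d p => if p.1 != start then d.modify p.2 [] (· ++ [p.1]) else d) d
      = ((g.filter (fun p => p.1 != start)).map (fun p => (p.2, p.1))).foldl
          (fun d q => d.modify q.1 [] (· ++ [q.2])) d := by
  induction g generalizing d with
  | nil => rfl
  | cons a t ih =>
    simp only [List.foldl_cons, List.filter_cons]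
    by_cases h : (a.1 != start) = true
    · rw [if_pos h, if_pos h, List.map_cons, List.foldl_cons]
      exact ih _
    · rw [if_neg h, if_neg h]
      exact ih d

-- the swapped filtered pairs, filtered by key and projected, are A's inner scan result
lemma dlw_proj (start link : Int) (g : List (Int × Int)) :
    (((g.filter (fun p => p.1 != start)).map (fun p => (p.2, p.1))).filter
        (fun q => q.1 == link)).map (·.2)
      = (g.filter (fun p => p.1 != start && p.2 == link)).map Prod.fst := by
  induction g with
  | nil => rfl
  | cons a t ih =>
    simp only [List.filter_cons]
    by_cases h1 : a.1 = start <;> by_cases h2 : a.2 = link <;>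
      simp [h1, h2, ih]

-- each bucket of the dict is exactly A's inner scan result
lemma dlw_bucket (start link : Int) (g : List (Int × Int)) :
    (g.foldl (fun d p => if p.1 != start then d.modify p.2 [] (· ++ [p.1]) else d)
        (PySem.Dict.empty : PySem.Dict Int (List Int))).getD link []
      = (g.filter (fun p => p.1 != start && p.2 == link)).map Prod.fst := by
  rw [dlw_fold_eq, PySem.Dict.getD_foldl_modify_append, ← dlw_proj start link g]
  simp

theorem directLinkWith_spec : Claim_equal_directLinkWith := by
  intro start g _
  unfold Spec_directLinkWith directLinkWith directLinkWith_alt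
  simp only [PySem.List.foldl_append_if, List.nil_append]
  have hb := PySem.List.foldl_congr_mem
      (l := (g.filter (fun x => x.1 == start)).map (fun x => x.2))
      (init := ([] : List Int))
      (f := fun acc link => acc ++
        (g.foldl (fun d p => if p.1 != start then d.modify p.2 [] (· ++ [p.1]) else d)
          (PySem.Dict.empty : PySem.Dict Int (List Int))).getD link [])
      (g := fun acc link => acc ++ (g.filter (fun p => p.1 != start && p.2 == link)).map Prod.fst)
      (fun acc link _ => by simp only [dlw_bucket])
  rw [hb]
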